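-- pv_equiv track=rewrite | github.com/posl/comment_recommendation | script/split_gen/2_time/en/192_B/5.py | hard_to_read
-- ===== SOURCE A (Python) =====
-- def hard_to_read(s):
--     for i in range(0, len(s), 2):
--         if s[i].islower():
--             continue
--         else:
--             return "No"
--     for i in range(1, len(s), 2):
--         if s[i].isupper():
--             continue
--         else:
--             return "No"
--     return "Yes"
-- ===== SOURCE B (Python) =====
-- def hard_to_read(s):
--     for i, c in enumerate(s):
--         ok = c.islower() if i % 2 == 0 else c.isupper()
--         if not ok:
--             return "No"
--     return "Yes"
-- ===== Notes on version B (the rewrite author's own statement) =====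
-- stated objective: simpler
-- what changed: Replaces A's two sequential strided passes (all even indices checked for lowercase, then all odd indices for uppercase) with a single interleaved pass over enumerate(s) that dispatches on index parity and stops at the first offending character.
import Mathlib
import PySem

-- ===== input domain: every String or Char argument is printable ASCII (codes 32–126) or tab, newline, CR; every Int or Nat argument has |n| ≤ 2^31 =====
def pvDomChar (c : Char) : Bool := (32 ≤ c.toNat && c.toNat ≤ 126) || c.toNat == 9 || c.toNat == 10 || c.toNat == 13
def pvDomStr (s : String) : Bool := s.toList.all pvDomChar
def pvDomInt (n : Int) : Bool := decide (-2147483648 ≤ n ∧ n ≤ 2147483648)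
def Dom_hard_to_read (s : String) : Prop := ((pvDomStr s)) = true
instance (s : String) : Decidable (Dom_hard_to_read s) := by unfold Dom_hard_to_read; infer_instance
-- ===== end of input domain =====

-- B is a single interleaved pass over enumerate(s) instead of A's two strided index passes; same values everywhere.

-- ===== PORT A =====
-- first loop of A: for i in range(0, len(s), 2): if s[i].islower(): continue else: return "No"
-- (indices drawn from range(0, len cs, 2) are always in bounds, so pyGetD with a dummy default is exact)
def pvLoopLower (cs : List Char) : List Int → Option String
  | [] => none
  | i :: rest =>
    if PySem.Chars.islower (PySem.List.pyGetD cs i ' ') then pvLoopLower cs rest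
    else some "No"

-- second loop of A: for i in range(1, len(s), 2): if s[i].isupper(): continue else: return "No"
def pvLoopUpper (cs : List Char) : List Int → Option String
  | [] => none
  | i :: rest =>
    if PySem.Chars.isupper (PySem.List.pyGetD cs i ' ') then pvLoopUpper cs rest
    else some "No"

def hard_to_read (s : String) : String :=
  let cs := s.toList
  match pvLoopLower cs (PySem.List.pyRange 0 cs.length 2) with
  | some r => r
  | none =>
    match pvLoopUpper cs (PySem.List.pyRange 1 cs.length 2) with
    | some r => r
    | none => "Yes"

-- ===== PORT B =====
-- for i, c in enumerate(s): ok = c.islower() if i % 2 == 0 else c.isupper(); if not ok: return "No"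
def pvAltGo : List (Int × Char) → String
  | [] => "Yes"
  | (i, c) :: rest =>
    let ok := if PySem.Int.mod i 2 == 0 then PySem.Chars.islower c else PySem.Chars.isupper c
    if !ok then "No" else pvAltGo rest

def hard_to_read_alt (s : String) : String :=
  pvAltGo (PySem.List.enumerate s.toList 0)

-- ===== PRECONDITION & SPEC =====
def Spec_hard_to_read (s : String) (out : String) : Prop := out = hard_to_read_alt s
instance (s : String) (out : String) : Decidable (Spec_hard_to_read s out) := by unfold Spec_hard_to_read; infer_instance

-- ===== CLAIM (what is proved, stated in full; the proofs are below) =====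
def Claim_equal_hard_to_read : Prop := ∀ (s : String), Dom_hard_to_read s → Spec_hard_to_read s (hard_to_read s)

-- ===== LEMMAS AND PROOFS =====

-- the per-position requirement both programs enforce
def pvOk (n : Nat) (c : Char) : Bool :=
  if n % 2 = 0 then PySem.Chars.islower c else PySem.Chars.isupper c

theorem pvLoopLower_eq (cs : List Char) (l : List Int) :
    pvLoopLower cs l =
      if ∀ i ∈ l, PySem.Chars.islower (PySem.List.pyGetD cs i ' ') = true then none else some "No" := by
  induction l with
  | nil => simp [pvLoopLower]
  | cons i rest ih =>
    simp only [pvLoopLower, ih, List.mem_cons, forall_eq_or_imp]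
    by_cases h : PySem.Chars.islower (PySem.List.pyGetD cs i ' ') = true <;> simp [h]

theorem pvLoopUpper_eq (cs : List Char) (l : List Int) :
    pvLoopUpper cs l =
      if ∀ i ∈ l, PySem.Chars.isupper (PySem.List.pyGetD cs i ' ') = true then none else some "No" := by
  induction l with
  | nil => simp [pvLoopUpper]
  | cons i rest ih =>
    simp only [pvLoopUpper, ih, List.mem_cons, forall_eq_or_imp]
    by_cases h : PySem.Chars.isupper (PySem.List.pyGetD cs i ' ') = true <;> simp [h]

theorem pvAltGo_eq (cs : List Char) (k : Nat) :
    pvAltGo (PySem.List.enumerate cs (k : Int)) =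
      if ∀ j, (h : j < cs.length) → pvOk (k + j) cs[j] = true then "Yes" else "No" := by
  induction cs generalizing k with
  | nil => simp [PySem.List.enumerate_nil, pvAltGo]
  | cons c rest ih =>
    have hk1 : ((k : Int) + 1) = ((k + 1 : Nat) : Int) := by push_cast; ring
    have hmod : (PySem.Int.mod (k : Int) 2 == 0) = decide (k % 2 = 0) := by
      have : PySem.Int.mod (k : Int) 2 = ((k % 2 : Nat) : Int) := by
        simp [PySem.Int.mod, Int.fmod_eq_emod]
      rw [this]
      by_cases h : k % 2 = 0 <;> simp [h] <;> try omega
    have hiff : (∀ j, (h : j < (c :: rest).length) → pvOk (k + j) ((c :: rest)[j]) = true)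
        ↔ (pvOk k c = true ∧ ∀ j, (h : j < rest.length) → pvOk (k + 1 + j) rest[j] = true) := by
      constructor
      · intro h
        refine ⟨by simpa using h 0 (by simp), fun j hj => ?_⟩
        have := h (j + 1) (by simpa using Nat.succ_lt_succ hj)
        simpa [Nat.add_comm, Nat.add_left_comm, Nat.add_assoc] using this
      · rintro ⟨h0, h1⟩ j hj
        cases j with
        | zero => simpa using h0
        | succ j =>
          have := h1 j (by simpa using Nat.lt_of_succ_lt_succ hj)
          simpa [Nat.add_comm, Nat.add_left_comm, Nat.add_assoc] using this
    rw [PySem.List.enumerate_cons]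
    simp only [pvAltGo, hmod, hk1, ih, hiff]
    by_cases h0 : pvOk k c = true
    · have hcond : (if k % 2 = 0 then PySem.Chars.islower c else PySem.Chars.isupper c) = true := by
        simpa [pvOk] using h0
      by_cases hE : k % 2 = 0 <;> simp_all [pvOk]
    · have : (if k % 2 = 0 then PySem.Chars.islower c else PySem.Chars.isupper c) ≠ true := by
        simpa [pvOk] using h0
      by_cases hE : k % 2 = 0 <;> simp_all [pvOk]

theorem pvBridge (cs : List Char) :
    ((∀ i ∈ PySem.List.pyRange 0 cs.length 2,
        PySem.Chars.islower (PySem.List.pyGetD cs i ' ') = true) ∧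
     (∀ i ∈ PySem.List.pyRange 1 cs.length 2,
        PySem.Chars.isupper (PySem.List.pyGetD cs i ' ') = true))
    ↔ (∀ j, (h : j < cs.length) → pvOk (0 + j) cs[j] = true) := by
  have hmem0 : ∀ i : Int, i ∈ PySem.List.pyRange 0 (cs.length : Int) 2 ↔
      0 ≤ i ∧ i < cs.length ∧ (2 : Int) ∣ i - 0 :=
    fun i => PySem.List.mem_pyRange_iff_of_pos (by norm_num) i
  have hmem1 : ∀ i : Int, i ∈ PySem.List.pyRange 1 (cs.length : Int) 2 ↔
      1 ≤ i ∧ i < cs.length ∧ (2 : Int) ∣ i - 1 :=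
    fun i => PySem.List.mem_pyRange_iff_of_pos (by norm_num) i
  have hget : ∀ (j : Nat) (hj : j < cs.length), PySem.List.pyGetD cs (j : Int) ' ' = cs[j]'hj := by
    intro j hj
    rw [PySem.List.pyGetD_natCast]
    exact List.getD_eq_getElem _ _ hj
  constructor
  · rintro ⟨hE, hO⟩ j hj
    by_cases hp : j % 2 = 0
    · have hm : (j : Int) ∈ PySem.List.pyRange 0 (cs.length : Int) 2 := by
        rw [hmem0]; refine ⟨by positivity, by exact_mod_cast hj, ?_⟩; omega
      have := hE _ hm
      rw [hget j hj] at this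
      simpa [pvOk, hp] using this
    · have hm : (j : Int) ∈ PySem.List.pyRange 1 (cs.length : Int) 2 := by
        rw [hmem1]
        refine ⟨by omega, by exact_mod_cast hj, ?_⟩; omega
      have := hO _ hm
      rw [hget j hj] at this
      simpa [pvOk, hp] using this
  · intro h
    constructor
    · intro i hi
      rw [hmem0] at hi
      obtain ⟨h1, h2, h3⟩ := hi
      have hj : i.toNat < cs.length := by omega
      have hp : i.toNat % 2 = 0 := by omega
      have := h i.toNat hj
      have hcast : ((i.toNat : Int)) = i := Int.toNat_of_nonneg h1
      rw [← hcast, hget i.toNat hj]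
      simpa [pvOk, hp] using this
    · intro i hi
      rw [hmem1] at hi
      obtain ⟨h1, h2, h3⟩ := hi
      have hj : i.toNat < cs.length := by omega
      have hp : i.toNat % 2 ≠ 0 := by omega
      have := h i.toNat hj
      have hcast : ((i.toNat : Int)) = i := Int.toNat_of_nonneg (by omega)
      rw [← hcast, hget i.toNat hj]
      simpa [pvOk, hp] using this

-- ===== VERDICT (by name: the statement is the Claim_ definition above) =====
theorem hard_to_read_spec : Claim_equal_hard_to_read := by
  intro s _
  unfold Spec_hard_to_read hard_to_read hard_to_read_alt
  have hB := pvAltGo_eq s.toList 0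
  simp only [Nat.cast_zero, Nat.zero_add] at hB
  rw [hB]
  simp only [pvLoopLower_eq, pvLoopUpper_eq]
  have hbr := pvBridge s.toList
  simp only [Nat.zero_add] at hbr
  split_ifs with h1 h2 h3 <;> try rfl
  all_goals tauto
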